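-- pv_equiv track=rewrite | github.com/pypi-data/pypi-mirror-350 | packages/webinfo-retriever/webinfo_retriever-2.1.0.tar.gz/webinfo_retriever-2.1.0/webinfo_retriever/core/response_generator.py | _truncate_response
-- ===== SOURCE A (Python) =====
-- def _truncate_response(response: str, max_length: int) -> str:
--     """Truncate response while preserving structure."""
--     if len(response) <= max_length:
--         return response
--
--     lines = response.split('\n')
--     truncated_lines = []
--     current_length = 0
--
--     for line in lines:
--         if current_length + len(line) + 1 > max_length:
--             break
--         truncated_lines.append(line)
--         current_length += len(line) + 1
--
--     truncated_response = '\n'.join(truncated_lines)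
--     if len(truncated_response) < len(response):
--         truncated_response += "\n\n[Response truncated due to length limits]"
--
--     return truncated_response
-- ===== SOURCE B (Python) =====
-- def _truncate_response(response: str, max_length: int) -> str:
--     """Truncate response at the last newline that fits, by a backward character scan."""
--     if len(response) <= max_length:
--         return response
--
--     # Since len(response) > max_length, the kept prefix must end just before a
--     # newline whose index is at most max_length - 1 (each kept line costs
--     # len(line)+1 including its newline).  Scan backwards for that newline.
--     p = max_length - 1
--     while p >= 0 and response[p] != '\n':
--         p -= 1
--
--     truncated_response = response[:p] if p >= 0 else ''
--     if len(truncated_response) < len(response):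
--         truncated_response += "\n\n[Response truncated due to length limits]"
--
--     return truncated_response
-- ===== Notes on version B (the rewrite author's own statement) =====
-- stated objective: alternative
-- what changed: Replaces A's split-into-lines + forward accumulate-and-break scan by a direct backward character scan: since each kept line costs len+1, the kept prefix must end just before a newline at index <= max_length-1, so B searches backwards from max_length-1 for that newline and slices the raw string, never splitting or joining lines.
import Mathlib
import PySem

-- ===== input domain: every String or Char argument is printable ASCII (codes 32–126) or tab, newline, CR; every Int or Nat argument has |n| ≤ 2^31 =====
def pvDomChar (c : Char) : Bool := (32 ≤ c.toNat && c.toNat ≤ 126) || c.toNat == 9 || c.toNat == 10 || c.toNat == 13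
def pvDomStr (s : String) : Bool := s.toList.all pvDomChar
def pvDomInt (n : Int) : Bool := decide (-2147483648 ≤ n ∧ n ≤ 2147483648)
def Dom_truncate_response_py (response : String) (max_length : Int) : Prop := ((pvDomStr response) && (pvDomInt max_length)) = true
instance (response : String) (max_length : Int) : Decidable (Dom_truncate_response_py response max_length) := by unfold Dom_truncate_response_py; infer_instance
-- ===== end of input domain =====

-- B replaces A's split-into-lines + forward accumulate-and-break scan by a backward character
-- scan for the last newline at index ≤ max_length-1 followed by one slice (alternative decomposition).

-- ===== PORT A =====
-- A's for-loop with break: keep lines while cumulative (len+1) stays ≤ max_length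
def truncALoop (max_length : Int) : List String → Int → List String
  | [], _ => []
  | l :: rest, cur =>
    if cur + PySem.Str.len l + 1 > max_length then []
    else l :: truncALoop max_length rest (cur + PySem.Str.len l + 1)

def truncate_response_py (response : String) (max_length : Int) : String :=
  if PySem.Str.len response ≤ max_length then response
  else
    let lines := (PySem.Str.split? response "\n").getD []
    let truncated_lines := truncALoop max_length lines 0
    let truncated_response := PySem.Str.join "\n" truncated_lines
    if PySem.Str.len truncated_response < PySem.Str.len response then
      truncated_response ++ "\n\n[Response truncated due to length limits]"
    else truncated_response

-- ===== PORT B =====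
-- B's while loop: p -= 1 while p >= 0 and response[p] != '\n'.  The index read is via pyGet?;
-- at B's call site p < len(response) always holds, so the `none` case is never reached.
def truncBScan (cs : List Char) (p : Int) : Int :=
  if h : 0 ≤ p ∧ PySem.List.pyGet? cs p ≠ some '\n' then truncBScan cs (p - 1) else p
termination_by (p + 1).toNat
decreasing_by have := h.1; omega

def truncate_response_py_alt (response : String) (max_length : Int) : String :=
  if PySem.Str.len response ≤ max_length then response
  else
    let p := truncBScan response.toList (max_length - 1)
    let truncated_response := if 0 ≤ p then PySem.Str.slice response none (some p) else ""
    if PySem.Str.len truncated_response < PySem.Str.len response then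
      truncated_response ++ "\n\n[Response truncated due to length limits]"
    else truncated_response

-- ===== PRECONDITION & SPEC =====
def Spec_truncate_response_py (response : String) (max_length : Int) (out : String) : Prop := out = truncate_response_py_alt response max_length
instance (response : String) (max_length : Int) (out : String) : Decidable (Spec_truncate_response_py response max_length out) := by unfold Spec_truncate_response_py; infer_instance

-- ===== CLAIM (what is proved, stated in full; the proofs are below) =====
def Claim_equal_truncate_response_py : Prop := ∀ (response : String) (max_length : Int), Dom_truncate_response_py response max_length → Spec_truncate_response_py response max_length (truncate_response_py response max_length)

-- ===== LEMMAS AND PROOFS =====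

lemma truncBScan_stop (cs : List Char) (p : Int)
    (h : ¬ (0 ≤ p ∧ PySem.List.pyGet? cs p ≠ some '\n')) : truncBScan cs p = p := by
  rw [truncBScan, dif_neg h]

lemma truncBScan_step (cs : List Char) (p : Int)
    (h : 0 ≤ p ∧ PySem.List.pyGet? cs p ≠ some '\n') : truncBScan cs p = truncBScan cs (p - 1) := by
  rw [truncBScan, dif_pos h]

lemma pyGet?_toNat (cs : List Char) (p : Int) (hp : 0 ≤ p) :
    PySem.List.pyGet? cs p = cs[p.toNat]? := by
  conv_lhs => rw [show p = ((p.toNat : Nat) : Int) from by omega]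
  rw [PySem.List.pyGet?_natCast]

-- scanning inside a newline-free block `a` never finds a newline
lemma truncBScan_prefix_aux (a d : List Char) (h : '\n' ∉ a) :
    ∀ (n : Nat) (p : Int), p < (n : Int) → p < (a.length : Int) → truncBScan (a ++ d) p < 0 := by
  intro n
  induction n with
  | zero =>
    intro p hp _
    rw [truncBScan_stop _ _ (by intro hc; omega)]
    omega
  | succ n ih =>
    intro p hp hpa
    by_cases hc : 0 ≤ p ∧ PySem.List.pyGet? (a ++ d) p ≠ some '\n'
    · rw [truncBScan_step _ _ hc]
      exact ih (p - 1) (by omega) (by omega)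
    · rw [truncBScan_stop _ _ hc]
      by_cases h0 : 0 ≤ p
      · exfalso
        have hget : PySem.List.pyGet? (a ++ d) p = some '\n' := by
          by_contra hne'
          exact hc ⟨h0, hne'⟩
        rw [pyGet?_toNat _ _ h0, List.getElem?_append_left (by omega)] at hget
        exact h (List.mem_of_getElem? hget)
      · omega

lemma truncBScan_prefix (a d : List Char) (p : Int) (h : '\n' ∉ a)
    (hp : p < (a.length : Int)) : truncBScan (a ++ d) p < 0 :=
  truncBScan_prefix_aux a d h (p + 1).toNat p (by omega) hp

-- scanning from at or past the first block's newline decomposes into a scan of the tail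
lemma truncBScan_append_aux (a b : List Char) :
    ∀ (n : Nat) (p : Int), p < (n : Int) → (a.length : Int) ≤ p →
      truncBScan (a ++ '\n' :: b) p =
        if 0 ≤ truncBScan b (p - a.length - 1) then truncBScan b (p - a.length - 1) + a.length + 1
        else (a.length : Int) := by
  intro n
  induction n with
  | zero => intro p hp hL; omega
  | succ n ih =>
    intro p hp hL
    by_cases hpe : p = (a.length : Int)
    · subst hpe
      have hget : PySem.List.pyGet? (a ++ '\n' :: b) (a.length : Int) = some '\n' := by
        rw [pyGet?_toNat _ _ (by omega), List.getElem?_append_right (by omega)]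
        simp
      rw [truncBScan_stop _ _ (fun hcond => hcond.2 hget)]
      rw [truncBScan_stop b _ (fun hcond => absurd hcond.1 (by omega))]
      have h2 : ¬ (0 ≤ (a.length : Int) - ↑a.length - 1) := by omega
      rw [if_neg h2]
    · have hgt : (a.length : Int) < p := by omega
      have hidx : p.toNat - a.length = (p - a.length - 1).toNat + 1 := by omega
      have hget : PySem.List.pyGet? (a ++ '\n' :: b) p = b[(p - a.length - 1).toNat]? := by
        rw [pyGet?_toNat _ _ (by omega), List.getElem?_append_right (by omega), hidx]
        simp
      have hgetb : PySem.List.pyGet? b (p - a.length - 1) = b[(p - a.length - 1).toNat]? :=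
        pyGet?_toNat b _ (by omega)
      by_cases hnl : b[(p - a.length - 1).toNat]? = some '\n'
      · rw [truncBScan_stop _ _ (fun hcond => hcond.2 (hget.trans hnl))]
        rw [truncBScan_stop b _ (fun hcond => hcond.2 (hgetb.trans hnl))]
        have h2 : (0 : Int) ≤ p - ↑a.length - 1 := by omega
        rw [if_pos h2]
        omega
      · rw [truncBScan_step _ _ ⟨by omega, fun he => hnl (hget.symm.trans he)⟩]
        rw [truncBScan_step b _ ⟨by omega, fun he => hnl (hgetb.symm.trans he)⟩]
        rw [ih (p - 1) (by omega) (by omega)]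
        rw [show p - 1 - (a.length : Int) - 1 = p - a.length - 1 - 1 by omega]

lemma truncBScan_append (a b : List Char) (p : Int)
    (hL : (a.length : Int) ≤ p) :
    truncBScan (a ++ '\n' :: b) p =
      if 0 ≤ truncBScan b (p - a.length - 1) then truncBScan b (p - a.length - 1) + a.length + 1
      else (a.length : Int) :=
  truncBScan_append_aux a b (p + 1).toNat p (by omega) hL

lemma truncALoop_cons (m : Int) (l : String) (rest : List String) (cur : Int) :
    truncALoop m (l :: rest) cur
      = if cur + PySem.Str.len l + 1 > m then [] else l :: truncALoop m rest (cur + PySem.Str.len l + 1) := rfl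

lemma take_decomp (a t : List Char) (q : Int) (hq : 0 ≤ q) :
    List.take (q + (a.length : Int) + 1).toNat (a ++ '\n' :: t) = a ++ '\n' :: List.take q.toNat t := by
  rw [show (q + (a.length : Int) + 1).toNat = a.length + (q.toNat + 1) from by omega]
  rw [List.take_append]
  rw [List.take_of_length_le (show a.length ≤ a.length + (q.toNat + 1) from by omega)]
  rw [show a.length + (q.toNat + 1) - a.length = q.toNat + 1 from by omega]
  rw [List.take_succ_cons]

lemma splitOn_ne_nil (cs : List Char) : List.splitOn '\n' cs ≠ [] := by
  simp only [List.splitOn]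
  exact List.splitOnP_ne_nil _ _

lemma splitOn_cons_newline (rest : List Char) :
    List.splitOn '\n' ('\n' :: rest) = [] :: List.splitOn '\n' rest := by
  simp [List.splitOn, List.splitOnP_cons]

lemma splitOn_cons_other (c : Char) (rest : List Char) (hc : c ≠ '\n') :
    List.splitOn '\n' (c :: rest) = List.modifyHead (List.cons c) (List.splitOn '\n' rest) := by
  simp [List.splitOn, List.splitOnP_cons, hc]

-- PySem's fuel-based splitOn, with enough fuel, is Mathlib's List.splitOn
lemma splitOn_go_eq : ∀ (fuel : Nat) (l cur : List Char) (acc : List (List Char)),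
    l.length ≤ fuel →
    PySem.Chars.splitOn.go ['\n'] fuel l cur acc
      = acc.reverse ++ (List.splitOn '\n' l).modifyHead (cur.reverse ++ ·) := by
  intro fuel
  induction fuel with
  | zero =>
    intro l cur acc hl
    have hnil : l = [] := by cases l <;> simp_all
    subst hnil
    simp [PySem.Chars.splitOn.go, List.splitOn_nil]
  | succ n ih =>
    intro l cur acc hl
    cases l with
    | nil => simp [PySem.Chars.splitOn.go, List.splitOn_nil]
    | cons c rest =>
      by_cases hc : c = '\n'
      · subst hc
        have hpre : ['\n'].isPrefixOf ('\n' :: rest) = true := by simp [List.isPrefixOf]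
        rw [show PySem.Chars.splitOn.go ['\n'] (n+1) ('\n' :: rest) cur acc
              = PySem.Chars.splitOn.go ['\n'] n (List.drop ['\n'].length ('\n' :: rest)) [] (cur.reverse :: acc) from by
          rw [PySem.Chars.splitOn.go]; rw [if_pos hpre]]
        simp only [List.length_singleton, List.drop_succ_cons, List.drop_zero]
        rw [ih rest [] (cur.reverse :: acc) (by simpa using hl)]
        rw [splitOn_cons_newline]
        rcases hne : List.splitOn '\n' rest with _ | ⟨h1, t⟩
        · exact absurd hne (splitOn_ne_nil _)
        · simp
      · have hpre : ['\n'].isPrefixOf (c :: rest) = false := by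
          simp [List.isPrefixOf]
          exact fun hh => absurd hh.symm hc
        rw [show PySem.Chars.splitOn.go ['\n'] (n+1) (c :: rest) cur acc
              = PySem.Chars.splitOn.go ['\n'] n rest (c :: cur) acc from by
          rw [PySem.Chars.splitOn.go]; rw [if_neg (by simp [hpre])]]
        rw [ih rest (c :: cur) acc (by simpa using hl)]
        rw [splitOn_cons_other c rest hc]
        rcases hne : List.splitOn '\n' rest with _ | ⟨h1, t⟩
        · exact absurd hne (splitOn_ne_nil _)
        · simp

lemma chars_splitOn_eq (cs : List Char) :
    PySem.Chars.splitOn cs ['\n'] = List.splitOn '\n' cs := by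
  unfold PySem.Chars.splitOn
  rw [splitOn_go_eq (cs.length + 1) cs [] [] (by omega)]
  rcases hne : List.splitOn '\n' cs with _ | ⟨h1, t⟩
  · exact absurd hne (splitOn_ne_nil _)
  · simp

-- no piece of splitOn '\n' contains a newline
lemma splitOn_pieces : ∀ (cs : List Char), ∀ l ∈ List.splitOn '\n' cs, '\n' ∉ l := by
  intro cs
  induction cs with
  | nil =>
    intro l hl
    rw [List.splitOn_nil] at hl
    simp only [List.mem_singleton] at hl
    simp [hl]
  | cons c rest ih =>
    intro l hl
    by_cases hc : c = '\n'
    · subst hc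
      rw [splitOn_cons_newline] at hl
      rcases List.mem_cons.mp hl with h | h
      · simp [h]
      · exact ih l h
    · rcases hne : List.splitOn '\n' rest with _ | ⟨h1, t⟩
      · exact absurd hne (splitOn_ne_nil rest)
      · rw [splitOn_cons_other c rest hc, hne] at hl
        simp only [List.modifyHead_cons] at hl
        rcases List.mem_cons.mp hl with h | h
        · subst h
          intro hmem
          rcases List.mem_cons.mp hmem with h' | h'
          · exact hc h'.symm
          · exact ih h1 (by rw [hne]; exact List.mem_cons_self ..) h'
        · exact ih l (by rw [hne]; exact List.mem_cons_of_mem _ h)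

-- the accumulator only shifts the budget
lemma truncALoop_shift (ls : List String) : ∀ (m cur : Int),
    truncALoop m ls cur = truncALoop (m - cur) ls 0 := by
  induction ls with
  | nil => intro m cur; rfl
  | cons l rest ih =>
    intro m cur
    rw [truncALoop_cons, truncALoop_cons]
    generalize PySem.Str.len l = L
    by_cases hc : cur + L + 1 > m
    · have h2 : 0 + L + 1 > m - cur := by omega
      rw [if_pos hc, if_pos h2]
    · have h2 : ¬ (0 + L + 1 > m - cur) := by omega
      rw [if_neg hc, if_neg h2, ih m (cur + L + 1), ih (m - cur) (0 + L + 1),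
          show m - (cur + L + 1) = m - cur - (0 + L + 1) from by omega]

-- MAIN: A's join-of-kept-lines is B's take-at-scan-result (plus: loop empty ↔ scan negative)
lemma truncMain : ∀ (lines : List String) (m : Int),
    lines ≠ [] → (∀ s ∈ lines, '\n' ∉ s.toList) →
    m ≤ ((PySem.Chars.join ['\n'] (lines.map String.toList)).length : Int) →
    (PySem.Chars.join ['\n'] ((truncALoop m lines 0).map String.toList)
       = if 0 ≤ truncBScan (PySem.Chars.join ['\n'] (lines.map String.toList)) (m - 1)
         then (PySem.Chars.join ['\n'] (lines.map String.toList)).take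
                (truncBScan (PySem.Chars.join ['\n'] (lines.map String.toList)) (m - 1)).toNat
         else [])
    ∧ (truncALoop m lines 0 = []
       ↔ truncBScan (PySem.Chars.join ['\n'] (lines.map String.toList)) (m - 1) < 0) := by
  intro lines
  induction lines with
  | nil => intro m h; exact absurd rfl h
  | cons l rest ih =>
    intro m _ hnl hm
    have hLfree : '\n' ∉ l.toList := hnl l (List.mem_cons_self ..)
    have hlen : PySem.Str.len l = (l.toList.length : Int) := by
      simp [PySem.Str.len]
    cases rest with
    | nil =>
      simp only [List.map_cons, List.map_nil, PySem.Chars.join_singleton] at hm ⊢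
      have hbreak : (0 : Int) + PySem.Str.len l + 1 > m := by rw [hlen]; omega
      have hloop : truncALoop m [l] 0 = [] := by
        rw [truncALoop_cons, if_pos hbreak]
      have hscan : truncBScan l.toList (m - 1) < 0 := by
        have := truncBScan_prefix l.toList [] (m - 1) hLfree (by omega)
        simpa using this
      refine ⟨?_, by simp [hloop, hscan]⟩
      rw [hloop]
      simp only [List.map_nil, PySem.Chars.join_nil]
      have hnneg : ¬ (0 ≤ truncBScan l.toList (m - 1)) := by omega
      rw [if_neg hnneg]
    | cons r rs =>
      simp only [List.map_cons] at ih hm ⊢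
      set cs' := PySem.Chars.join ['\n'] (r.toList :: List.map String.toList rs) with hcs'
      have hcons : PySem.Chars.join ['\n'] (l.toList :: r.toList :: List.map String.toList rs)
          = l.toList ++ '\n' :: cs' := by
        rw [PySem.Chars.join_cons_cons, ← hcs']
        simp
      rw [hcons] at hm ⊢
      have hclen : (l.toList ++ '\n' :: cs').length = l.toList.length + 1 + cs'.length := by
        simp; omega
      by_cases hfit : (0 : Int) + PySem.Str.len l + 1 > m
      · have hloop : truncALoop m (l :: r :: rs) 0 = [] := by
          rw [truncALoop_cons, if_pos hfit]
        have hscan : truncBScan (l.toList ++ '\n' :: cs') (m - 1) < 0 :=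
          truncBScan_prefix _ _ _ hLfree (by rw [hlen] at hfit; omega)
        refine ⟨?_, by simp [hloop, hscan]⟩
        rw [hloop]
        simp only [List.map_nil, PySem.Chars.join_nil]
        have hnneg : ¬ (0 ≤ truncBScan (l.toList ++ '\n' :: cs') (m - 1)) := by omega
        rw [if_neg hnneg]
      · have hfit' : (l.toList.length : Int) + 1 ≤ m := by rw [hlen] at hfit; omega
        have hstep : truncALoop m (l :: r :: rs) 0
            = l :: truncALoop (m - (l.toList.length : Int) - 1) (r :: rs) 0 := by
          rw [truncALoop_cons, if_neg hfit, truncALoop_shift]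
          rw [show m - (0 + PySem.Str.len l + 1) = m - (l.toList.length : Int) - 1 from by
            rw [hlen]; omega]
        have hm' : m - (l.toList.length : Int) - 1 ≤ (cs'.length : Int) := by
          rw [hclen] at hm
          push_cast at hm
          omega
        obtain ⟨ihEq, ihIff⟩ := ih (m - (l.toList.length : Int) - 1) (by simp)
          (fun s hs => hnl s (List.mem_cons_of_mem _ hs)) hm'
        have hLm : (l.toList.length : Int) ≤ m - 1 := by omega
        have hdec := truncBScan_append l.toList cs' (m - 1) hLm
        rw [show m - 1 - (l.toList.length : Int) - 1 = m - (l.toList.length : Int) - 1 - 1 by omega] at hdec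
        set q := truncBScan cs' (m - (l.toList.length : Int) - 1 - 1) with hq
        by_cases hp' : 0 ≤ q
        · rw [if_pos hp'] at hdec
          have hrne : truncALoop (m - (l.toList.length : Int) - 1) (r :: rs) 0 ≠ [] :=
            fun hz => absurd (ihIff.mp hz) (by omega)
          rcases hx : truncALoop (m - (l.toList.length : Int) - 1) (r :: rs) 0 with _ | ⟨x, xs⟩
          · exact absurd hx hrne
          · rw [hx] at ihEq
            simp only [List.map_cons] at ihEq
            rw [if_pos hp'] at ihEq
            constructor
            · rw [hstep, hx]
              simp only [List.map_cons]
              have hpos : (0 : Int) ≤ q + ↑l.toList.length + 1 := by omega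
              rw [PySem.Chars.join_cons_cons, ihEq, hdec, if_pos hpos, take_decomp _ _ _ hp']
              simp
            · rw [hstep, hdec]
              constructor
              · intro hz; exact absurd hz (by simp)
              · intro hz; exact absurd hz (by omega)
        · rw [if_neg hp'] at hdec
          have hrnil : truncALoop (m - (l.toList.length : Int) - 1) (r :: rs) 0 = [] :=
            ihIff.mpr (by omega)
          rw [hstep, hrnil]
          constructor
          · simp only [List.map_cons, List.map_nil, PySem.Chars.join_singleton]
            have hpos : (0 : Int) ≤ ((l.toList.length : Int)) := by omega
            rw [hdec, if_pos hpos]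
            rw [show ((l.toList.length : Int)).toNat = l.toList.length from by omega]
            rw [List.take_left]
          · rw [hdec]
            constructor
            · intro hz; exact absurd hz (by simp)
            · intro hz; exact absurd hz (by omega)

-- ===== VERDICT (by name: the statement is the Claim_ definition above) =====
theorem truncate_response_py_spec : Claim_equal_truncate_response_py := by
  intro response m _
  unfold Spec_truncate_response_py truncate_response_py truncate_response_py_alt
  by_cases hg : PySem.Str.len response ≤ m
  · rw [if_pos hg, if_pos hg]
  · rw [if_neg hg, if_neg hg]
    show (if PySem.Str.len (PySem.Str.join "\n" (truncALoop m ((PySem.Str.split? response "\n").getD []) 0)) < PySem.Str.len response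
          then PySem.Str.join "\n" (truncALoop m ((PySem.Str.split? response "\n").getD []) 0) ++ "\n\n[Response truncated due to length limits]"
          else PySem.Str.join "\n" (truncALoop m ((PySem.Str.split? response "\n").getD []) 0))
        = (if PySem.Str.len (if 0 ≤ truncBScan response.toList (m - 1) then PySem.Str.slice response none (some (truncBScan response.toList (m - 1))) else "") < PySem.Str.len response
           then (if 0 ≤ truncBScan response.toList (m - 1) then PySem.Str.slice response none (some (truncBScan response.toList (m - 1))) else "") ++ "\n\n[Response truncated due to length limits]"
           else (if 0 ≤ truncBScan response.toList (m - 1) then PySem.Str.slice response none (some (truncBScan response.toList (m - 1))) else ""))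
    have hlenr : PySem.Str.len response = (response.toList.length : Int) := by simp [PySem.Str.len]
    have hsplit := PySem.Str.split?_map response "\n"
    rw [show ("\n" : String).toList = ['\n'] from by decide] at hsplit
    rw [show PySem.Chars.split? response.toList ['\n'] = some (List.splitOn '\n' response.toList) from by
      simp [PySem.Chars.split?, chars_splitOn_eq]] at hsplit
    cases hs : PySem.Str.split? response "\n" with
    | none => rw [hs] at hsplit; simp at hsplit
    | some lines =>
      rw [hs] at hsplit
      simp only [Option.map_some, Option.some.injEq] at hsplit
      have hne : lines ≠ [] := by
        intro h; subst h
        simp only [List.map_nil] at hsplit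
        exact splitOn_ne_nil _ hsplit.symm
      have hnlf : ∀ s ∈ lines, '\n' ∉ s.toList := fun s hsm =>
        splitOn_pieces response.toList s.toList (hsplit ▸ List.mem_map_of_mem hsm)
      have hjoin : PySem.Chars.join ['\n'] (lines.map String.toList) = response.toList := by
        unfold PySem.Chars.join
        rw [hsplit]
        exact List.intercalate_splitOn response.toList '\n'
      have hmlen : m ≤ ((PySem.Chars.join ['\n'] (lines.map String.toList)).length : Int) := by
        rw [hjoin]
        rw [hlenr] at hg
        omega
      obtain ⟨hEq, -⟩ := truncMain lines m hne hnlf hmlen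
      rw [hjoin] at hEq
      simp only [Option.getD_some]
      have hAB : PySem.Str.join "\n" (truncALoop m lines 0)
          = (if 0 ≤ truncBScan response.toList (m - 1)
             then PySem.Str.slice response none (some (truncBScan response.toList (m - 1))) else "") := by
        apply String.ext
        rw [PySem.Str.toList_join]
        rw [show ("\n" : String).toList = ['\n'] from by decide]
        by_cases hp : 0 ≤ truncBScan response.toList (m - 1)
        · rw [if_pos hp] at hEq ⊢
          rw [PySem.Str.toList_slice]
          rw [show PySem.Chars.slice response.toList none (some (truncBScan response.toList (m - 1)))
                = List.take (truncBScan response.toList (m - 1)).toNat response.toList from by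
            simp only [PySem.Chars.slice_eq_listSlice]
            exact PySem.List.slice_to _ hp]
          exact hEq
        · rw [if_neg hp] at hEq ⊢
          rw [hEq]
          rfl
      rw [hAB]
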